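-- pv_equiv track=rewrite | github.com/alexddrexler/adventofcode2024 | solutions/year2023/day01/part2.py | is_spelled_num
-- ===== SOURCE A (Python) =====
-- SPELLED_NUMS = [
--     "one",
--     "two",
--     "three",
--     "four",
--     "five",
--     "six",
--     "seven",
--     "eight",
--     "nine",
-- ]
--
-- def is_spelled_num(row, idx):
--   for val_minus_one, num in enumerate(SPELLED_NUMS):
--     if len(row) - idx < len(num):
--       continue
--     is_num = True
--     for i, num_char in enumerate(num):
--       if row[idx + i] != num_char:
--         is_num = False
--         break
--     if is_num:
--       return str(val_minus_one + 1)
--   return None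
-- ===== SOURCE B (Python) =====
-- WORD_TO_DIGIT = {
--     "one": "1", "two": "2", "three": "3",
--     "four": "4", "five": "5", "six": "6",
--     "seven": "7", "eight": "8", "nine": "9",
-- }
--
-- def is_spelled_num(row, idx):
--   for length in (3, 4, 5):
--     digit = WORD_TO_DIGIT.get(row[idx:idx + length])
--     if digit is not None:
--       return digit
--   return None
-- ===== Notes on version B (the rewrite author's own statement) =====
-- stated objective: idiomatic
-- what changed: Replaced the nine per-word character-comparison scans with a module-level word-to-digit dict and three slice-and-hash lookups, one per candidate word length (3, 4, 5).
-- outside the precondition, e.g. on is_spelled_num('one', -3): A returns '1', B returns None; on is_spelled_num('ab', -5): A raises IndexError, B returns None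
import Mathlib
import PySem

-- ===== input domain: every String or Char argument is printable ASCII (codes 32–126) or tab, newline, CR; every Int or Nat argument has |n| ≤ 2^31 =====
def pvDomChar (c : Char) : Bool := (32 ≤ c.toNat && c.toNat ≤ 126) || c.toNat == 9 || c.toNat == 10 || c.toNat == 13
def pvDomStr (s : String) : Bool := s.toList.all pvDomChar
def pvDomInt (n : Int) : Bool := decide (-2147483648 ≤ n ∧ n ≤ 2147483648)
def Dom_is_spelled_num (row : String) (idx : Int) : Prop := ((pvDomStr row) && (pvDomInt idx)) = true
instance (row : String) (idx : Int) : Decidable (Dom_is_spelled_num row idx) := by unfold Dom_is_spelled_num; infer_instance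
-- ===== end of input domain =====

-- B replaces A's nine per-word character-scan loops by a word→digit dict and three slice lookups
-- (one per candidate length); equivalence is proved on idx ≥ 0 (return values only, no mutation).

-- ===== PORT A =====
def pvSpelledNums : List String :=
  ["one", "two", "three", "four", "five", "six", "seven", "eight", "nine"]

-- inner loop 'for i, num_char in enumerate(num)': row[idx+i] != num_char breaks with is_num=False.
-- PySem.Str.pyGet? returns none exactly where Python raises IndexError; that is excluded by
-- Pre_is_spelled_num (with idx ≥ 0 the outer guard keeps every access in range), so none is
-- treated as a mismatch here.
def pvInnerA (row : String) (idx : Int) : Int → List Char → Bool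
  | _, [] => true
  | i, c :: rest =>
    if PySem.Str.pyGet? row (idx + i) ≠ some c then false
    else pvInnerA row idx (i + 1) rest

-- outer loop 'for val_minus_one, num in enumerate(SPELLED_NUMS)'
def pvOuterA (row : String) (idx : Int) : Int → List String → Option String
  | _, [] => none
  | valMinusOne, num :: rest =>
    if PySem.Str.len row - idx < PySem.Str.len num then
      pvOuterA row idx (valMinusOne + 1) rest
    else if pvInnerA row idx 0 num.toList then some (PySem.Int.toStr (valMinusOne + 1))
    else pvOuterA row idx (valMinusOne + 1) rest

def is_spelled_num (row : String) (idx : Int) : Option String :=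
  pvOuterA row idx 0 pvSpelledNums

-- ===== PORT B =====
def pvWordToDigit : PySem.Dict String String :=
  PySem.Dict.ofList
    [("one", "1"), ("two", "2"), ("three", "3"), ("four", "4"), ("five", "5"),
     ("six", "6"), ("seven", "7"), ("eight", "8"), ("nine", "9")]

-- 'for length in (3, 4, 5): digit = WORD_TO_DIGIT.get(row[idx:idx+length]); if digit is not None: return digit'
def pvLoopB (row : String) (idx : Int) : List Int → Option String
  | [] => none
  | len :: rest =>
    match PySem.Dict.get? pvWordToDigit (PySem.Str.slice row (some idx) (some (idx + len))) with
    | some digit => some digit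
    | none => pvLoopB row idx rest

def is_spelled_num_alt (row : String) (idx : Int) : Option String :=
  pvLoopB row idx [3, 4, 5]

-- ===== PRECONDITION & SPEC =====
-- Pre_ excludes idx < 0, where A either raises IndexError (idx < -len(row), when some word still
-- fits the length guard) or reads characters through Python's negative-index wraparound — an
-- accidental corner no caller specifies, where A's wrapped match and B's clamped-slice None are
-- equally defensible.
def Pre_is_spelled_num (row : String) (idx : Int) : Prop := 0 ≤ idx
instance (row : String) (idx : Int) : Decidable (Pre_is_spelled_num row idx) := by
  unfold Pre_is_spelled_num; infer_instance

def pvWitness_is_spelled_num : String × Int := ("xtwone3four", 3)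

def Spec_is_spelled_num (row : String) (idx : Int) (out : Option String) : Prop :=
  out = is_spelled_num_alt row idx
instance (row : String) (idx : Int) (out : Option String) : Decidable (Spec_is_spelled_num row idx out) := by
  unfold Spec_is_spelled_num; infer_instance

-- ===== CLAIM (what is proved, stated in full; the proofs are below) =====
def Claim_equal_is_spelled_num : Prop :=
  ∀ (row : String) (idx : Int), Dom_is_spelled_num row idx → Pre_is_spelled_num row idx →
    Spec_is_spelled_num row idx (is_spelled_num row idx)

-- ===== LEMMAS AND PROOFS =====
-- A's result, re-expressed: the first spelled word that is a prefix of row[idx:]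
def pvFChain (t : List Char) : Option String :=
  if "one".toList <+: t then some "1"
  else if "two".toList <+: t then some "2"
  else if "three".toList <+: t then some "3"
  else if "four".toList <+: t then some "4"
  else if "five".toList <+: t then some "5"
  else if "six".toList <+: t then some "6"
  else if "seven".toList <+: t then some "7"
  else if "eight".toList <+: t then some "8"
  else if "nine".toList <+: t then some "9"
  else none

-- the dict lookup of B, on the character-list side
def pvLook (u : List Char) : Option String :=
  if "one".toList = u then some "1"
  else if "two".toList = u then some "2"
  else if "three".toList = u then some "3"
  else if "four".toList = u then some "4"
  else if "five".toList = u then some "5"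
  else if "six".toList = u then some "6"
  else if "seven".toList = u then some "7"
  else if "eight".toList = u then some "8"
  else if "nine".toList = u then some "9"
  else none

-- B's result, re-expressed on row[idx:]
def pvGChain (t : List Char) : Option String :=
  match pvLook (t.take 3) with
  | some d => some d
  | none =>
    match pvLook (t.take 4) with
    | some d => some d
    | none => pvLook (t.take 5)

lemma pv_cons_prefix_drop (l : List Char) (m : Nat) (c : Char) (rest : List Char) :
    (c :: rest <+: l.drop m) ↔ l[m]? = some c ∧ rest <+: l.drop (m + 1) := by
  have h1 : l[m]? = (l.drop m)[0]? := by simp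
  rcases hd : l.drop m with _ | ⟨d, u⟩
  · simp [h1, hd]
  · have h2 : l.drop (m + 1) = u := by
      rw [← List.drop_drop, hd]; rfl
    rw [h1, hd, h2]
    simp [List.cons_prefix_cons, eq_comm]

lemma pv_innerA_eq (row : String) (idx i : Int) (cs : List Char)
    (hidx : 0 ≤ idx) (hi : 0 ≤ i) :
    pvInnerA row idx i cs = decide (cs <+: row.toList.drop (idx + i).toNat) := by
  induction cs generalizing i with
  | nil => simp [pvInnerA]
  | cons c rest ih =>
    have hg : PySem.Str.pyGet? row (idx + i) = row.toList[(idx + i).toNat]? := by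
      rw [show PySem.Str.pyGet? row (idx + i) = PySem.List.pyGet? row.toList (idx + i) by simp]
      apply PySem.List.pyGet?_of_nonneg
      omega
    have hnext : (idx + (i + 1)).toNat = (idx + i).toNat + 1 := by omega
    rw [pvInnerA, hg, ih (i+1) (by omega)]
    by_cases hc : row.toList[(idx + i).toNat]? = some c
    · simp [hc, pv_cons_prefix_drop, hnext]
    · simp [hc, pv_cons_prefix_drop]

lemma pv_outerA_step (row : String) (idx : Int) (v : Int) (w : String) (ws : List String)
    (h : 0 ≤ idx) (hw : 0 < w.toList.length) :
    pvOuterA row idx v (w :: ws) =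
      if w.toList <+: row.toList.drop idx.toNat then some (PySem.Int.toStr (v + 1))
      else pvOuterA row idx (v + 1) ws := by
  rw [pvOuterA]
  have hlr : PySem.Str.len row = (row.toList.length : Int) := by simp [PySem.Str.len_eq]
  have hlw : PySem.Str.len w = (w.toList.length : Int) := by simp [PySem.Str.len_eq]
  have hdlen : (row.toList.drop idx.toNat).length = row.toList.length - idx.toNat := by simp
  by_cases hg : PySem.Str.len row - idx < PySem.Str.len w
  · rw [if_pos hg]
    have hnp : ¬ (w.toList <+: row.toList.drop idx.toNat) := by
      intro hp
      have h1 := hp.length_le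
      simp only [List.length_drop] at h1
      rw [hlr, hlw] at hg
      have h2 : ((idx.toNat : Int)) = idx := Int.toNat_of_nonneg h
      omega
    rw [if_neg hnp]
  · rw [if_neg hg, pv_innerA_eq row idx 0 w.toList h le_rfl]
    have : (idx + 0).toNat = idx.toNat := by omega
    rw [this]
    by_cases hp : w.toList <+: row.toList.drop idx.toNat
    · simp [hp]
    · simp [hp]

lemma pv_A_eq (row : String) (idx : Int) (h : 0 ≤ idx) :
    is_spelled_num row idx = pvFChain (row.toList.drop idx.toNat) := by
  rw [is_spelled_num, pvSpelledNums]
  rw [pv_outerA_step row idx _ _ _ h (by decide), pv_outerA_step row idx _ _ _ h (by decide),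
      pv_outerA_step row idx _ _ _ h (by decide), pv_outerA_step row idx _ _ _ h (by decide),
      pv_outerA_step row idx _ _ _ h (by decide), pv_outerA_step row idx _ _ _ h (by decide),
      pv_outerA_step row idx _ _ _ h (by decide), pv_outerA_step row idx _ _ _ h (by decide),
      pv_outerA_step row idx _ _ _ h (by decide)]
  rw [pvFChain, pvOuterA]
  have e1 : PySem.Int.toStr (0+1) = "1" := by decide
  have e2 : PySem.Int.toStr (0+1+1) = "2" := by decide
  have e3 : PySem.Int.toStr (0+1+1+1) = "3" := by decide
  have e4 : PySem.Int.toStr (0+1+1+1+1) = "4" := by decide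
  have e5 : PySem.Int.toStr (0+1+1+1+1+1) = "5" := by decide
  have e6 : PySem.Int.toStr (0+1+1+1+1+1+1) = "6" := by decide
  have e7 : PySem.Int.toStr (0+1+1+1+1+1+1+1) = "7" := by decide
  have e8 : PySem.Int.toStr (0+1+1+1+1+1+1+1+1) = "8" := by decide
  have e9 : PySem.Int.toStr (0+1+1+1+1+1+1+1+1+1) = "9" := by decide
  simp only [e1, e2, e3, e4, e5, e6, e7, e8, e9]

lemma pv_get?_eq_look (s : String) :
    PySem.Dict.get? pvWordToDigit s = pvLook s.toList := by
  have hd : pvWordToDigit = PySem.Dict.mk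
    [("one", "1"), ("two", "2"), ("three", "3"), ("four", "4"), ("five", "5"),
     ("six", "6"), ("seven", "7"), ("eight", "8"), ("nine", "9")] := by decide
  rw [hd, pvLook]
  simp only [PySem.Dict.get?_mk_cons, beq_iff_eq, String.ext_iff]
  rfl

lemma pv_slice_toList (row : String) (idx : Int) (L : Nat) (h : 0 ≤ idx) :
    (PySem.Str.slice row (some idx) (some (idx + (L : Int)))).toList =
      (row.toList.drop idx.toNat).take L := by
  rw [PySem.Str.toList_slice]
  rw [PySem.Chars.slice_eq_listSlice]
  rw [PySem.List.slice_toNat _ h (by omega)]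
  congr 1
  omega

lemma pv_B_eq (row : String) (idx : Int) (h : 0 ≤ idx) :
    is_spelled_num_alt row idx = pvGChain (row.toList.drop idx.toNat) := by
  rw [is_spelled_num_alt, pvGChain]
  rw [pvLoopB, pvLoopB, pvLoopB, pvLoopB]
  rw [pv_get?_eq_look, pv_get?_eq_look, pv_get?_eq_look]
  rw [show ((3:Int)) = ((3:Nat):Int) by norm_num] 
  rw [show ((4:Int)) = ((4:Nat):Int) by norm_num]
  rw [show ((5:Int)) = ((5:Nat):Int) by norm_num]
  rw [pv_slice_toList row idx 3 h, pv_slice_toList row idx 4 h, pv_slice_toList row idx 5 h]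
  rcases pvLook (List.take 3 (List.drop idx.toNat row.toList)) with _ | d <;>
    rcases h4 : pvLook (List.take 4 (List.drop idx.toNat row.toList)) with _ | d4 <;>
      rcases h5 : pvLook (List.take 5 (List.drop idx.toNat row.toList)) with _ | d5 <;> simp_all

lemma pv_take_ne_long (t : List Char) (L : Nat) (w : List Char) (h : L < w.length) :
    t.take L ≠ w := by
  intro e
  have := congrArg List.length e
  simp at this
  omega

lemma pv_take_ne_of_not_prefix (t : List Char) (L : Nat) (w : List Char) (h : ¬ w <+: t) :
    t.take L ≠ w := fun e => h (e ▸ List.take_prefix L t)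

lemma pv_take_ne_of_other_prefix (t : List Char) (L : Nat) (w w' : List Char)
    (hw : w <+: t) (h1 : ¬ w' <+: w) (h2 : ¬ w <+: w') : t.take L ≠ w' := by
  intro e
  have hw' : w' <+: t := e ▸ List.take_prefix L t
  rcases List.prefix_or_prefix_of_prefix hw' hw with h | h
  · exact h1 h
  · exact h2 h

lemma pv_crux (t : List Char) : pvFChain t = pvGChain t := by
  by_cases h1 : "one".toList <+: t
  · have e : t.take 3 = "one".toList := by simpa using (List.prefix_iff_eq_take.mp h1).symm
    simp_all [pvFChain, pvGChain, pvLook]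
  by_cases h2 : "two".toList <+: t
  · have e : t.take 3 = "two".toList := by simpa using (List.prefix_iff_eq_take.mp h2).symm
    simp_all [pvFChain, pvGChain, pvLook]
  by_cases h3 : "three".toList <+: t
  · have e : t.take 5 = "three".toList := by simpa using (List.prefix_iff_eq_take.mp h3).symm
    have n0 : "one".toList ≠ t.take 3 := Ne.symm (pv_take_ne_of_other_prefix t 3 "three".toList "one".toList h3 (by decide) (by decide))
    have n1 : "two".toList ≠ t.take 3 := Ne.symm (pv_take_ne_of_other_prefix t 3 "three".toList "two".toList h3 (by decide) (by decide))
    have n2 : "three".toList ≠ t.take 3 := Ne.symm (pv_take_ne_long t 3 "three".toList (by decide))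
    have n3 : "four".toList ≠ t.take 3 := Ne.symm (pv_take_ne_long t 3 "four".toList (by decide))
    have n4 : "five".toList ≠ t.take 3 := Ne.symm (pv_take_ne_long t 3 "five".toList (by decide))
    have n5 : "six".toList ≠ t.take 3 := Ne.symm (pv_take_ne_of_other_prefix t 3 "three".toList "six".toList h3 (by decide) (by decide))
    have n6 : "seven".toList ≠ t.take 3 := Ne.symm (pv_take_ne_long t 3 "seven".toList (by decide))
    have n7 : "eight".toList ≠ t.take 3 := Ne.symm (pv_take_ne_long t 3 "eight".toList (by decide))
    have n8 : "nine".toList ≠ t.take 3 := Ne.symm (pv_take_ne_long t 3 "nine".toList (by decide))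
    have n9 : "one".toList ≠ t.take 4 := Ne.symm (pv_take_ne_of_other_prefix t 4 "three".toList "one".toList h3 (by decide) (by decide))
    have n10 : "two".toList ≠ t.take 4 := Ne.symm (pv_take_ne_of_other_prefix t 4 "three".toList "two".toList h3 (by decide) (by decide))
    have n11 : "three".toList ≠ t.take 4 := Ne.symm (pv_take_ne_long t 4 "three".toList (by decide))
    have n12 : "four".toList ≠ t.take 4 := Ne.symm (pv_take_ne_of_other_prefix t 4 "three".toList "four".toList h3 (by decide) (by decide))
    have n13 : "five".toList ≠ t.take 4 := Ne.symm (pv_take_ne_of_other_prefix t 4 "three".toList "five".toList h3 (by decide) (by decide))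
    have n14 : "six".toList ≠ t.take 4 := Ne.symm (pv_take_ne_of_other_prefix t 4 "three".toList "six".toList h3 (by decide) (by decide))
    have n15 : "seven".toList ≠ t.take 4 := Ne.symm (pv_take_ne_long t 4 "seven".toList (by decide))
    have n16 : "eight".toList ≠ t.take 4 := Ne.symm (pv_take_ne_long t 4 "eight".toList (by decide))
    have n17 : "nine".toList ≠ t.take 4 := Ne.symm (pv_take_ne_of_other_prefix t 4 "three".toList "nine".toList h3 (by decide) (by decide))
    simp_all [pvFChain, pvGChain, pvLook]
  by_cases h4 : "four".toList <+: t
  · have e : t.take 4 = "four".toList := by simpa using (List.prefix_iff_eq_take.mp h4).symm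
    have n0 : "one".toList ≠ t.take 3 := Ne.symm (pv_take_ne_of_other_prefix t 3 "four".toList "one".toList h4 (by decide) (by decide))
    have n1 : "two".toList ≠ t.take 3 := Ne.symm (pv_take_ne_of_other_prefix t 3 "four".toList "two".toList h4 (by decide) (by decide))
    have n2 : "three".toList ≠ t.take 3 := Ne.symm (pv_take_ne_long t 3 "three".toList (by decide))
    have n3 : "four".toList ≠ t.take 3 := Ne.symm (pv_take_ne_long t 3 "four".toList (by decide))
    have n4 : "five".toList ≠ t.take 3 := Ne.symm (pv_take_ne_long t 3 "five".toList (by decide))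
    have n5 : "six".toList ≠ t.take 3 := Ne.symm (pv_take_ne_of_other_prefix t 3 "four".toList "six".toList h4 (by decide) (by decide))
    have n6 : "seven".toList ≠ t.take 3 := Ne.symm (pv_take_ne_long t 3 "seven".toList (by decide))
    have n7 : "eight".toList ≠ t.take 3 := Ne.symm (pv_take_ne_long t 3 "eight".toList (by decide))
    have n8 : "nine".toList ≠ t.take 3 := Ne.symm (pv_take_ne_long t 3 "nine".toList (by decide))
    simp_all [pvFChain, pvGChain, pvLook]
  by_cases h5 : "five".toList <+: t
  · have e : t.take 4 = "five".toList := by simpa using (List.prefix_iff_eq_take.mp h5).symm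
    have n0 : "one".toList ≠ t.take 3 := Ne.symm (pv_take_ne_of_other_prefix t 3 "five".toList "one".toList h5 (by decide) (by decide))
    have n1 : "two".toList ≠ t.take 3 := Ne.symm (pv_take_ne_of_other_prefix t 3 "five".toList "two".toList h5 (by decide) (by decide))
    have n2 : "three".toList ≠ t.take 3 := Ne.symm (pv_take_ne_long t 3 "three".toList (by decide))
    have n3 : "four".toList ≠ t.take 3 := Ne.symm (pv_take_ne_long t 3 "four".toList (by decide))
    have n4 : "five".toList ≠ t.take 3 := Ne.symm (pv_take_ne_long t 3 "five".toList (by decide))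
    have n5 : "six".toList ≠ t.take 3 := Ne.symm (pv_take_ne_of_other_prefix t 3 "five".toList "six".toList h5 (by decide) (by decide))
    have n6 : "seven".toList ≠ t.take 3 := Ne.symm (pv_take_ne_long t 3 "seven".toList (by decide))
    have n7 : "eight".toList ≠ t.take 3 := Ne.symm (pv_take_ne_long t 3 "eight".toList (by decide))
    have n8 : "nine".toList ≠ t.take 3 := Ne.symm (pv_take_ne_long t 3 "nine".toList (by decide))
    simp_all [pvFChain, pvGChain, pvLook]
  by_cases h6 : "six".toList <+: t
  · have e : t.take 3 = "six".toList := by simpa using (List.prefix_iff_eq_take.mp h6).symm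
    simp_all [pvFChain, pvGChain, pvLook]
  by_cases h7 : "seven".toList <+: t
  · have e : t.take 5 = "seven".toList := by simpa using (List.prefix_iff_eq_take.mp h7).symm
    have n0 : "one".toList ≠ t.take 3 := Ne.symm (pv_take_ne_of_other_prefix t 3 "seven".toList "one".toList h7 (by decide) (by decide))
    have n1 : "two".toList ≠ t.take 3 := Ne.symm (pv_take_ne_of_other_prefix t 3 "seven".toList "two".toList h7 (by decide) (by decide))
    have n2 : "three".toList ≠ t.take 3 := Ne.symm (pv_take_ne_long t 3 "three".toList (by decide))
    have n3 : "four".toList ≠ t.take 3 := Ne.symm (pv_take_ne_long t 3 "four".toList (by decide))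
    have n4 : "five".toList ≠ t.take 3 := Ne.symm (pv_take_ne_long t 3 "five".toList (by decide))
    have n5 : "six".toList ≠ t.take 3 := Ne.symm (pv_take_ne_of_other_prefix t 3 "seven".toList "six".toList h7 (by decide) (by decide))
    have n6 : "seven".toList ≠ t.take 3 := Ne.symm (pv_take_ne_long t 3 "seven".toList (by decide))
    have n7 : "eight".toList ≠ t.take 3 := Ne.symm (pv_take_ne_long t 3 "eight".toList (by decide))
    have n8 : "nine".toList ≠ t.take 3 := Ne.symm (pv_take_ne_long t 3 "nine".toList (by decide))
    have n9 : "one".toList ≠ t.take 4 := Ne.symm (pv_take_ne_of_other_prefix t 4 "seven".toList "one".toList h7 (by decide) (by decide))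
    have n10 : "two".toList ≠ t.take 4 := Ne.symm (pv_take_ne_of_other_prefix t 4 "seven".toList "two".toList h7 (by decide) (by decide))
    have n11 : "three".toList ≠ t.take 4 := Ne.symm (pv_take_ne_long t 4 "three".toList (by decide))
    have n12 : "four".toList ≠ t.take 4 := Ne.symm (pv_take_ne_of_other_prefix t 4 "seven".toList "four".toList h7 (by decide) (by decide))
    have n13 : "five".toList ≠ t.take 4 := Ne.symm (pv_take_ne_of_other_prefix t 4 "seven".toList "five".toList h7 (by decide) (by decide))
    have n14 : "six".toList ≠ t.take 4 := Ne.symm (pv_take_ne_of_other_prefix t 4 "seven".toList "six".toList h7 (by decide) (by decide))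
    have n15 : "seven".toList ≠ t.take 4 := Ne.symm (pv_take_ne_long t 4 "seven".toList (by decide))
    have n16 : "eight".toList ≠ t.take 4 := Ne.symm (pv_take_ne_long t 4 "eight".toList (by decide))
    have n17 : "nine".toList ≠ t.take 4 := Ne.symm (pv_take_ne_of_other_prefix t 4 "seven".toList "nine".toList h7 (by decide) (by decide))
    simp_all [pvFChain, pvGChain, pvLook]
  by_cases h8 : "eight".toList <+: t
  · have e : t.take 5 = "eight".toList := by simpa using (List.prefix_iff_eq_take.mp h8).symm
    have n0 : "one".toList ≠ t.take 3 := Ne.symm (pv_take_ne_of_other_prefix t 3 "eight".toList "one".toList h8 (by decide) (by decide))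
    have n1 : "two".toList ≠ t.take 3 := Ne.symm (pv_take_ne_of_other_prefix t 3 "eight".toList "two".toList h8 (by decide) (by decide))
    have n2 : "three".toList ≠ t.take 3 := Ne.symm (pv_take_ne_long t 3 "three".toList (by decide))
    have n3 : "four".toList ≠ t.take 3 := Ne.symm (pv_take_ne_long t 3 "four".toList (by decide))
    have n4 : "five".toList ≠ t.take 3 := Ne.symm (pv_take_ne_long t 3 "five".toList (by decide))
    have n5 : "six".toList ≠ t.take 3 := Ne.symm (pv_take_ne_of_other_prefix t 3 "eight".toList "six".toList h8 (by decide) (by decide))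
    have n6 : "seven".toList ≠ t.take 3 := Ne.symm (pv_take_ne_long t 3 "seven".toList (by decide))
    have n7 : "eight".toList ≠ t.take 3 := Ne.symm (pv_take_ne_long t 3 "eight".toList (by decide))
    have n8 : "nine".toList ≠ t.take 3 := Ne.symm (pv_take_ne_long t 3 "nine".toList (by decide))
    have n9 : "one".toList ≠ t.take 4 := Ne.symm (pv_take_ne_of_other_prefix t 4 "eight".toList "one".toList h8 (by decide) (by decide))
    have n10 : "two".toList ≠ t.take 4 := Ne.symm (pv_take_ne_of_other_prefix t 4 "eight".toList "two".toList h8 (by decide) (by decide))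
    have n11 : "three".toList ≠ t.take 4 := Ne.symm (pv_take_ne_long t 4 "three".toList (by decide))
    have n12 : "four".toList ≠ t.take 4 := Ne.symm (pv_take_ne_of_other_prefix t 4 "eight".toList "four".toList h8 (by decide) (by decide))
    have n13 : "five".toList ≠ t.take 4 := Ne.symm (pv_take_ne_of_other_prefix t 4 "eight".toList "five".toList h8 (by decide) (by decide))
    have n14 : "six".toList ≠ t.take 4 := Ne.symm (pv_take_ne_of_other_prefix t 4 "eight".toList "six".toList h8 (by decide) (by decide))
    have n15 : "seven".toList ≠ t.take 4 := Ne.symm (pv_take_ne_long t 4 "seven".toList (by decide))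
    have n16 : "eight".toList ≠ t.take 4 := Ne.symm (pv_take_ne_long t 4 "eight".toList (by decide))
    have n17 : "nine".toList ≠ t.take 4 := Ne.symm (pv_take_ne_of_other_prefix t 4 "eight".toList "nine".toList h8 (by decide) (by decide))
    simp_all [pvFChain, pvGChain, pvLook]
  by_cases h9 : "nine".toList <+: t
  · have e : t.take 4 = "nine".toList := by simpa using (List.prefix_iff_eq_take.mp h9).symm
    have n0 : "one".toList ≠ t.take 3 := Ne.symm (pv_take_ne_of_other_prefix t 3 "nine".toList "one".toList h9 (by decide) (by decide))
    have n1 : "two".toList ≠ t.take 3 := Ne.symm (pv_take_ne_of_other_prefix t 3 "nine".toList "two".toList h9 (by decide) (by decide))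
    have n2 : "three".toList ≠ t.take 3 := Ne.symm (pv_take_ne_long t 3 "three".toList (by decide))
    have n3 : "four".toList ≠ t.take 3 := Ne.symm (pv_take_ne_long t 3 "four".toList (by decide))
    have n4 : "five".toList ≠ t.take 3 := Ne.symm (pv_take_ne_long t 3 "five".toList (by decide))
    have n5 : "six".toList ≠ t.take 3 := Ne.symm (pv_take_ne_of_other_prefix t 3 "nine".toList "six".toList h9 (by decide) (by decide))
    have n6 : "seven".toList ≠ t.take 3 := Ne.symm (pv_take_ne_long t 3 "seven".toList (by decide))
    have n7 : "eight".toList ≠ t.take 3 := Ne.symm (pv_take_ne_long t 3 "eight".toList (by decide))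
    have n8 : "nine".toList ≠ t.take 3 := Ne.symm (pv_take_ne_long t 3 "nine".toList (by decide))
    simp_all [pvFChain, pvGChain, pvLook]
  · have n0 : "one".toList ≠ t.take 3 := Ne.symm (pv_take_ne_of_not_prefix t 3 "one".toList h1)
    have n1 : "two".toList ≠ t.take 3 := Ne.symm (pv_take_ne_of_not_prefix t 3 "two".toList h2)
    have n2 : "three".toList ≠ t.take 3 := Ne.symm (pv_take_ne_long t 3 "three".toList (by decide))
    have n3 : "four".toList ≠ t.take 3 := Ne.symm (pv_take_ne_long t 3 "four".toList (by decide))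
    have n4 : "five".toList ≠ t.take 3 := Ne.symm (pv_take_ne_long t 3 "five".toList (by decide))
    have n5 : "six".toList ≠ t.take 3 := Ne.symm (pv_take_ne_of_not_prefix t 3 "six".toList h6)
    have n6 : "seven".toList ≠ t.take 3 := Ne.symm (pv_take_ne_long t 3 "seven".toList (by decide))
    have n7 : "eight".toList ≠ t.take 3 := Ne.symm (pv_take_ne_long t 3 "eight".toList (by decide))
    have n8 : "nine".toList ≠ t.take 3 := Ne.symm (pv_take_ne_long t 3 "nine".toList (by decide))
    have n9 : "one".toList ≠ t.take 4 := Ne.symm (pv_take_ne_of_not_prefix t 4 "one".toList h1)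
    have n10 : "two".toList ≠ t.take 4 := Ne.symm (pv_take_ne_of_not_prefix t 4 "two".toList h2)
    have n11 : "three".toList ≠ t.take 4 := Ne.symm (pv_take_ne_long t 4 "three".toList (by decide))
    have n12 : "four".toList ≠ t.take 4 := Ne.symm (pv_take_ne_of_not_prefix t 4 "four".toList h4)
    have n13 : "five".toList ≠ t.take 4 := Ne.symm (pv_take_ne_of_not_prefix t 4 "five".toList h5)
    have n14 : "six".toList ≠ t.take 4 := Ne.symm (pv_take_ne_of_not_prefix t 4 "six".toList h6)
    have n15 : "seven".toList ≠ t.take 4 := Ne.symm (pv_take_ne_long t 4 "seven".toList (by decide))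
    have n16 : "eight".toList ≠ t.take 4 := Ne.symm (pv_take_ne_long t 4 "eight".toList (by decide))
    have n17 : "nine".toList ≠ t.take 4 := Ne.symm (pv_take_ne_of_not_prefix t 4 "nine".toList h9)
    have n18 : "one".toList ≠ t.take 5 := Ne.symm (pv_take_ne_of_not_prefix t 5 "one".toList h1)
    have n19 : "two".toList ≠ t.take 5 := Ne.symm (pv_take_ne_of_not_prefix t 5 "two".toList h2)
    have n20 : "three".toList ≠ t.take 5 := Ne.symm (pv_take_ne_of_not_prefix t 5 "three".toList h3)
    have n21 : "four".toList ≠ t.take 5 := Ne.symm (pv_take_ne_of_not_prefix t 5 "four".toList h4)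
    have n22 : "five".toList ≠ t.take 5 := Ne.symm (pv_take_ne_of_not_prefix t 5 "five".toList h5)
    have n23 : "six".toList ≠ t.take 5 := Ne.symm (pv_take_ne_of_not_prefix t 5 "six".toList h6)
    have n24 : "seven".toList ≠ t.take 5 := Ne.symm (pv_take_ne_of_not_prefix t 5 "seven".toList h7)
    have n25 : "eight".toList ≠ t.take 5 := Ne.symm (pv_take_ne_of_not_prefix t 5 "eight".toList h8)
    have n26 : "nine".toList ≠ t.take 5 := Ne.symm (pv_take_ne_of_not_prefix t 5 "nine".toList h9)
    simp_all [pvFChain, pvGChain, pvLook]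

-- ===== VERDICT (by name: the statement is the Claim_ definition above) =====
theorem is_spelled_num_spec : Claim_equal_is_spelled_num := by
  intro row idx _ hpre
  unfold Spec_is_spelled_num
  have h : (0:Int) ≤ idx := hpre
  rw [pv_A_eq row idx h, pv_B_eq row idx h, pv_crux]
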